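-- pv_equiv track=rewrite | github.com/AlanVek/Proyectos-Viejos-Python | parcial3.py | leercru
-- ===== SOURCE A (Python) =====
-- def leercru(a):
-- 	p=""
-- 	listapal=[]
-- 	for i in range (0,len(a)):
-- 		for j in range (0,len(a[0])):
-- 			if a[i][j]=="*":
-- 				if len(p)>=2:
-- 					listapal+=[p]
-- 					p=""
-- 				else:
-- 					p=""
-- 			else:
--
-- 				if j==(len(a[0])-1):
-- 					if len(p)>=1:
-- 						p+=a[i][j]
-- 						listapal+=[p]
-- 						p=""
-- 					else:
-- 						p=""
--
-- 				else:
-- 					p+=a[i][j]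
-- 	p=""
-- 	for j in range (0,len(a[0])):
-- 		for i in range (0,len(a)):
-- 			if a[i][j]=="*":
-- 				if len(p)>=2:
-- 					listapal+=[p]
-- 					p=""
-- 				else:
-- 					p=""
-- 			else:
-- 				if i==len(a)-1:
-- 					if len(p)>=1:
-- 						p+=a[i][j]
-- 						listapal+=[p]
-- 						p=""
-- 					else:
-- 						p=""
-- 				else:
-- 					p+=a[i][j]
-- 	return (listapal)
-- ===== SOURCE B (Python) =====
-- def leercru(a):
--     w = len(a[0])
--     lines = [r[:w] for r in a] + [[r[j] for r in a] for j in range(w)]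
--     words = []
--     for cells in lines:
--         while "*" in cells:
--             k = cells.index("*")
--             word = "".join(cells[:k])
--             if len(word) >= 2:
--                 words.append(word)
--             cells = cells[k + 1:]
--         if "".join(cells[:-1]):
--             words.append("".join(cells))
--     return words
-- ===== Notes on version B (the rewrite author's own statement) =====
-- stated objective: simpler
-- what changed: A's two duplicated index-driven per-character state machines (with an end-of-line branch inside each inner loop) are replaced by building the list of lines once (row slices plus column gathers) and cutting each line at its '*' cells by repeated index-and-slice, joining each run into a word; Pre_ only excludes the empty grid and grids with a row shorter than the first row, on which A raises IndexError.
import Mathlib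
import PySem

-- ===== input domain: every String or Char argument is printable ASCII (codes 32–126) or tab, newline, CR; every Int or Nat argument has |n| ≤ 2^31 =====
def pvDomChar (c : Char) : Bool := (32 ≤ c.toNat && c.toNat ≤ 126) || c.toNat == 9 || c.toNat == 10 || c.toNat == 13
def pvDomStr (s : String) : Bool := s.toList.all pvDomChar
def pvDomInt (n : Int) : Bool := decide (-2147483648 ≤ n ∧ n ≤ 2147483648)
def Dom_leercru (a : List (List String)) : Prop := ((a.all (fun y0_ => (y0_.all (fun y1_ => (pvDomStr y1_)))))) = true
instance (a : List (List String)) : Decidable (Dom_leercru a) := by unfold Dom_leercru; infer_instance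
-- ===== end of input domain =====

-- B builds the list of lines once (row slices plus column gathers) and cuts each line at its
-- '*' cells by repeated index-and-slice, replacing A's two duplicated per-character state
-- machines (objective: simpler).

-- ===== PORT A =====
-- a[i][j] as a list of code points (len(p) in A counts code points, so the accumulator p is List Char)
def leercruCell (a : List (List String)) (i j : Int) : List Char :=
  ((PySem.List.pyGet? ((PySem.List.pyGet? a i).getD []) j).getD "").toList

def leercru (a : List (List String)) : List String :=
  let n : Int := PySem.List.len a
  let m : Int := PySem.List.len ((PySem.List.pyGet? a 0).getD [])
  -- first double loop: rows;  state = (p, listapal)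
  let s1 : List Char × List String :=
    (PySem.List.pyRange 0 n 1).foldl (fun st i =>
      (PySem.List.pyRange 0 m 1).foldl (fun st j =>
        if leercruCell a i j = ['*'] then
          if 2 ≤ st.1.length then ([], st.2 ++ [String.ofList st.1]) else ([], st.2)
        else
          if j = m - 1 then
            if 1 ≤ st.1.length then ([], st.2 ++ [String.ofList (st.1 ++ leercruCell a i j)])
            else ([], st.2)
          else (st.1 ++ leercruCell a i j, st.2)) st) ([], [])
  -- second double loop: columns
  let s2 : List Char × List String :=
    (PySem.List.pyRange 0 m 1).foldl (fun st j =>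
      (PySem.List.pyRange 0 n 1).foldl (fun st i =>
        if leercruCell a i j = ['*'] then
          if 2 ≤ st.1.length then ([], st.2 ++ [String.ofList st.1]) else ([], st.2)
        else
          if i = n - 1 then
            if 1 ≤ st.1.length then ([], st.2 ++ [String.ofList (st.1 ++ leercruCell a i j)])
            else ([], st.2)
          else (st.1 ++ leercruCell a i j, st.2)) st) ([], s1.2)
  s2.2

-- ===== PORT B =====
-- the 'while "*" in cells' loop of Source B: cut the line at its first '*', keep the run if it
-- joins to at least two characters, continue on the remainder
def lineWords (cells : List String) (words : List String) : List String :=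
  if hmem : "*" ∈ cells then
    let k : Nat := (PySem.List.index? cells "*").getD 0
    let word := PySem.Str.join "" (PySem.List.slice cells none (some (k : Int)))
    lineWords (PySem.List.slice cells (some ((k : Int) + 1)) none)
      (if 2 ≤ PySem.Str.len word then words ++ [word] else words)
  else
    if PySem.Str.join "" (PySem.List.slice cells none (some (-1))) ≠ "" then
      words ++ [PySem.Str.join "" cells]
    else words
termination_by cells.length
decreasing_by
  rw [show (k : Int) + 1 = ((k + 1 : Nat) : Int) from by push_cast; ring,
    PySem.List.slice_from_natCast]
  have hne : cells ≠ [] := List.ne_nil_of_mem hmem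
  have : 0 < cells.length := List.length_pos_of_ne_nil hne
  simp only [List.length_drop]
  omega

def leercru_alt (a : List (List String)) : List String :=
  let w : Int := PySem.List.len ((PySem.List.pyGet? a 0).getD [])
  let lines : List (List String) :=
    a.map (fun r => PySem.List.slice r none (some w)) ++
      (PySem.List.pyRange 0 w 1).map
        (fun j => a.map (fun r => (PySem.List.pyGet? r j).getD ""))
  lines.foldl (fun words cells => lineWords cells words) []

-- ===== PRECONDITION & SPEC =====
-- Pre_ = exactly the inputs on which Python A returns: a nonempty grid whose rows all have at
-- least len(a[0]) cells (otherwise a[0] or a[i][j] raises IndexError).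
def Pre_leercru (a : List (List String)) : Prop :=
  a ≠ [] ∧ ∀ row ∈ a, (a.headD []).length ≤ row.length
instance (a : List (List String)) : Decidable (Pre_leercru a) := by unfold Pre_leercru; infer_instance
def pvWitness_leercru : List (List String) := [["c","a","*"],["s","*","x"],["a","b","c"]]

def Spec_leercru (a : List (List String)) (out : List String) : Prop := out = leercru_alt a
instance (a : List (List String)) (out : List String) : Decidable (Spec_leercru a out) := by unfold Spec_leercru; infer_instance

-- ===== CLAIM (what is proved, stated in full; the proofs are below) =====
def Claim_equal_leercru : Prop := ∀ (a : List (List String)), Dom_leercru a → Pre_leercru a → Spec_leercru a (leercru a)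

-- ===== LEMMAS AND PROOFS =====

theorem joinNil (l : List (List Char)) : PySem.Chars.join [] l = l.flatten := by
  induction l with
  | nil => rfl
  | cons c t ih =>
    cases t with
    | nil => simp [PySem.Chars.join, List.intercalate]
    | cons d u => rw [PySem.Chars.join_cons_cons] at *; simp [List.flatten] at *; simp [ih]

-- the characters of a line of cells
def jc (cells : List String) : List Char := (cells.map String.toList).flatten

theorem joinStr (cells : List String) :
    PySem.Str.join "" cells = String.ofList (jc cells) := by
  have h : (PySem.Str.join "" cells).toList = jc cells := by
    rw [PySem.Str.toList_join, show ("" : String).toList = [] from rfl, joinNil]; rfl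
  rw [← h, String.ofList_toList]

theorem jc_append (l₁ l₂ : List String) : jc (l₁ ++ l₂) = jc l₁ ++ jc l₂ := by
  simp [jc]

-- A's per-line state machine, recursively (last cell handled by the end-of-line branch)
def lineA (p : List Char) (L : List String) : List (List Char) → List String
  | [] => L
  | [c] =>
      if c = ['*'] then (if 2 ≤ p.length then L ++ [String.ofList p] else L)
      else (if 1 ≤ p.length then L ++ [String.ofList (p ++ c)] else L)
  | c :: d :: rest =>
      if c = ['*'] then lineA [] (if 2 ≤ p.length then L ++ [String.ofList p] else L) (d :: rest)
      else lineA (p ++ c) L (d :: rest)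

theorem toList_eq_star {c : String} (h : c.toList = ['*']) : c = "*" := by
  rw [← String.ofList_toList (s := c), h]

-- B's while-loop unfolded once on pcells ++ "*" :: rest  (the first '*' sits after pcells)
theorem len_ofList (l : List Char) : PySem.Str.len (String.ofList l) = (l.length : Int) := by
  rw [PySem.Str.len_eq, String.toList_ofList]

theorem ofList_eq_empty (l : List Char) : String.ofList l = "" ↔ l = [] := by
  constructor
  · intro h
    have := congrArg String.toList h
    simpa [String.toList_ofList] using this
  · intro h; rw [h]

-- B's while-loop unfolded once on pcells ++ "*" :: rest  (the first '*' sits after pcells)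
theorem lineWords_star (pcells rest : List String) (L : List String) (hp : "*" ∉ pcells) :
    lineWords (pcells ++ "*" :: rest) L
      = lineWords rest
          (if 2 ≤ (jc pcells).length then L ++ [String.ofList (jc pcells)] else L) := by
  have hmem : "*" ∈ pcells ++ "*" :: rest := by simp
  have hidx : PySem.List.index? (pcells ++ "*" :: rest) "*" = some pcells.length :=
    (PySem.List.index?_eq_some_iff _ _ _).mpr ⟨pcells, rest, rfl, rfl, hp⟩
  rw [lineWords]
  simp only [hmem, hidx, dite_true, Option.getD_some]
  rw [PySem.List.slice_to_natCast,
    show ((pcells.length : Int) + 1) = ((pcells.length + 1 : Nat) : Int) from by push_cast; ring,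
    PySem.List.slice_from_natCast]
  rw [show List.take pcells.length (pcells ++ "*" :: rest) = pcells from List.take_left,
    show List.drop (pcells.length + 1) (pcells ++ "*" :: rest) = rest from by
      rw [show pcells ++ "*" :: rest = (pcells ++ ["*"]) ++ rest from by simp,
        show pcells.length + 1 = (pcells ++ ["*"]).length from by simp]
      exact List.drop_left]
  rw [joinStr pcells, len_ofList]
  by_cases h2 : 2 ≤ (jc pcells).length
  · rw [if_pos (by exact_mod_cast h2), if_pos h2]
  · rw [if_neg (by exact_mod_cast h2), if_neg h2]

-- B's while-loop on a line with no '*': the trailing-run branch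
theorem lineWords_noStar (cells : List String) (L : List String) (hm : "*" ∉ cells) :
    lineWords cells L
      = if 1 ≤ (jc cells.dropLast).length then L ++ [String.ofList (jc cells)] else L := by
  rw [lineWords]
  simp only [hm, dite_false]
  rw [PySem.List.slice_to_neg_one, joinStr cells.dropLast, joinStr cells]
  by_cases h1 : 1 ≤ (jc cells.dropLast).length
  · rw [if_pos (by
      intro h
      rw [ofList_eq_empty] at h
      rw [h] at h1; simp at h1), if_pos h1]
  · rw [if_neg (by
      intro h
      exact h (by
        rw [ofList_eq_empty]
        cases hl : jc cells.dropLast with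
        | nil => rfl
        | cons x xs => rw [hl] at h1; simp at h1)), if_neg h1]

-- A's line machine = B's cut-at-'*' loop, with the pending run kept as the consumed cells
theorem lineA_eq_lineWords : ∀ (cells pcells : List String) (L : List String),
    "*" ∉ pcells → cells ≠ [] →
    lineA (jc pcells) L (cells.map String.toList) = lineWords (pcells ++ cells) L := by
  intro cells
  induction cells with
  | nil => intro _ _ _ h; exact absurd rfl h
  | cons c t ih =>
    intro pcells L hp _
    cases t with
    | nil =>
      by_cases hc : c = "*"
      · subst hc
        rw [show ([("*" : String)].map String.toList) = [['*']] from rfl]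
        rw [lineWords_star pcells [] L hp]
        rw [lineWords_noStar [] _ (by simp)]
        simp [lineA, jc]
      · have hstar : ¬ (c.toList = ['*']) := fun h => hc (toList_eq_star h)
        have hp' : ("*" : String) ∉ pcells ++ [c] := by
          intro h
          rcases List.mem_append.mp h with h1 | h1
          · exact hp h1
          · have h2 : ("*" : String) = c := by simpa using h1
            exact hc h2.symm
        rw [show ([c].map String.toList) = [c.toList] from rfl]
        rw [lineWords_noStar (pcells ++ [c]) L hp']
        rw [List.dropLast_concat, jc_append]
        have hA : lineA (jc pcells) L [c.toList]
            = if 1 ≤ (jc pcells).length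
              then L ++ [String.ofList (jc pcells ++ c.toList)] else L := by
          simp [lineA, hstar]
        rw [hA]
        simp [jc]
    | cons d rest =>
      by_cases hc : c = "*"
      · subst hc
        rw [show ((("*" : String) :: d :: rest).map String.toList)
              = ['*'] :: ((d :: rest).map String.toList) from rfl]
        rw [show lineA (jc pcells) L (['*'] :: ((d :: rest).map String.toList))
              = lineA [] (if 2 ≤ (jc pcells).length then L ++ [String.ofList (jc pcells)] else L)
                  ((d :: rest).map String.toList) from by simp [lineA]]
        rw [show ([] : List Char) = jc [] from rfl]
        rw [ih [] _ (by simp) (by simp)]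
        rw [lineWords_star pcells (d :: rest) L hp]
        simp
      · have hstar : ¬ (c.toList = ['*']) := fun h => hc (toList_eq_star h)
        have hp' : ("*" : String) ∉ pcells ++ [c] := by
          intro h
          rcases List.mem_append.mp h with h1 | h1
          · exact hp h1
          · have h2 : ("*" : String) = c := by simpa using h1
            exact hc h2.symm
        rw [show ((c :: d :: rest).map String.toList)
              = c.toList :: ((d :: rest).map String.toList) from rfl]
        rw [show lineA (jc pcells) L (c.toList :: ((d :: rest).map String.toList))
              = lineA (jc pcells ++ c.toList) L ((d :: rest).map String.toList) from by
            simp [lineA, hstar]]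
        rw [show jc pcells ++ c.toList = jc (pcells ++ [c]) from by simp [jc]]
        rw [ih (pcells ++ [c]) _ hp' (by simp)]
        simp

-- the special case actually used: the whole line
theorem lineA_line (cells : List String) (L : List String) (h : cells ≠ []) :
    lineA [] L (cells.map String.toList) = lineWords cells L := by
  have := lineA_eq_lineWords cells [] L (by simp) h
  simpa [jc] using this

-- A's inner indexed loop over one line = lineA (generic in the cell accessor)
theorem innerA (get : Int → List Char) (m : Int) :
    ∀ (cs : List (List Char)) (p : List Char) (L : List String),
    (∀ k : Nat, (hk : k < cs.length) → get (m - cs.length + k) = cs[k]) →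
    (PySem.List.pyRange (m - cs.length) m 1).foldl
      (fun (st : List Char × List String) j =>
        if get j = ['*'] then
          if 2 ≤ st.1.length then ([], st.2 ++ [String.ofList st.1]) else ([], st.2)
        else
          if j = m - 1 then
            if 1 ≤ st.1.length then ([], st.2 ++ [String.ofList (st.1 ++ get j)])
            else ([], st.2)
          else (st.1 ++ get j, st.2)) (p, L)
    = (if cs = [] then p else [], lineA p L cs) := by
  intro cs
  induction cs with
  | nil =>
    intro p L _
    simp [lineA]
  | cons c t ih =>
    intro p L hget
    have hs : m - ((c :: t).length : Int) < m := by
      simp only [List.length_cons]; push_cast; omega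
    rw [PySem.List.pyRange_one_cons hs, List.foldl_cons]
    have h0 : get (m - ((c :: t).length : Int)) = c := by
      have := hget 0 (by simp)
      simpa using this
    have hstep : m - ((c :: t).length : Int) + 1 = m - (t.length : Int) := by
      simp only [List.length_cons]; push_cast; omega
    have hget' : ∀ k : Nat, (hk : k < t.length) → get (m - t.length + k) = t[k] := by
      intro k hk
      have := hget (k + 1) (by simp only [List.length_cons]; omega)
      have harg : m - ((c :: t).length : Int) + ((k : Int) + 1) = m - t.length + k := by
        simp only [List.length_cons]; push_cast; omega
      rw [show ((k + 1 : Nat) : Int) = (k : Int) + 1 by push_cast; ring, harg] at this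
      simpa using this
    by_cases hc : c = ['*']
    · rw [h0, if_pos hc]
      cases t with
      | nil =>
        rw [hstep]
        simp only [List.length_nil, Nat.cast_zero, sub_zero,
          PySem.List.pyRange_one_eq_nil (le_refl m), List.foldl_nil, lineA, hc]
        split_ifs <;> simp_all
      | cons d rest =>
        rw [hstep] at *
        by_cases h2 : 2 ≤ p.length <;>
          simp only [h2, if_true, if_false] <;>
          rw [ih _ _ hget'] <;> simp [lineA, hc, h2]
    · rw [h0, if_neg hc]
      cases t with
      | nil =>
        have hlast : m - ((c :: ([] : List (List Char))).length : Int) = m - 1 := by simp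
        rw [if_pos hlast, hstep]
        by_cases h1 : 1 ≤ p.length <;>
          simp [h1, PySem.List.pyRange_one_eq_nil (le_refl m), lineA, hc]
      | cons d rest =>
        have hlast : ¬ (m - ((c :: d :: rest).length : Int) = m - 1) := by simp; omega
        rw [if_neg hlast]
        rw [hstep] at *
        rw [ih _ _ hget']
        simp [lineA, hc]

-- fold a per-line step over a list of indices, threading only the output list
theorem foldPair (f : (List Char × List String) → Int → (List Char × List String))
    (g : List String → Int → List String) :
    ∀ (js : List Int), (∀ j ∈ js, ∀ L, f ([], L) j = ([], g L j)) →
    ∀ L, js.foldl f ([], L) = ([], js.foldl g L) := by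
  intro js
  induction js with
  | nil => intro _ L; rfl
  | cons j t ih =>
    intro h L
    rw [List.foldl_cons, h j (by simp), List.foldl_cons]
    exact ih (fun j' hj' => h j' (by simp [hj'])) _

-- range-from-zero form of innerA
theorem innerA0 (get : Int → List Char) (m : Int) (cs : List (List Char)) (p : List Char)
    (L : List String) (hlen : (cs.length : Int) = m)
    (hget : ∀ k : Nat, (hk : k < cs.length) → get k = cs[k]) :
    (PySem.List.pyRange 0 m 1).foldl
      (fun (st : List Char × List String) j =>
        if get j = ['*'] then
          if 2 ≤ st.1.length then ([], st.2 ++ [String.ofList st.1]) else ([], st.2)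
        else
          if j = m - 1 then
            if 1 ≤ st.1.length then ([], st.2 ++ [String.ofList (st.1 ++ get j)])
            else ([], st.2)
          else (st.1 ++ get j, st.2)) (p, L)
    = (if cs = [] then p else [], lineA p L cs) := by
  have h := innerA get m cs p L (by
    intro k hk
    have := hget k hk
    rwa [show m - cs.length + k = (k : Int) by omega])
  rwa [show m - (cs.length : Int) = 0 by omega] at h

-- one row of A's first double loop = B's cut loop on that row's first mN cells
theorem rowStep (a : List (List String)) (mN : Nat) (hm0 : 0 < mN) (i : Int)
    (hrow : ∀ row ∈ a, mN ≤ row.length) (hi : 0 ≤ i) (hin : i < (a.length : Int))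
    (L : List String) :
    (PySem.List.pyRange 0 (mN : Int) 1).foldl
      (fun (st : List Char × List String) j =>
        if leercruCell a i j = ['*'] then
          if 2 ≤ st.1.length then ([], st.2 ++ [String.ofList st.1]) else ([], st.2)
        else
          if j = (mN : Int) - 1 then
            if 1 ≤ st.1.length then ([], st.2 ++ [String.ofList (st.1 ++ leercruCell a i j)])
            else ([], st.2)
          else (st.1 ++ leercruCell a i j, st.2)) ([], L)
    = ([], lineWords ((PySem.List.pyGetD a i []).take mN) L) := by
  have hmemrow : PySem.List.pyGetD a i [] ∈ a :=
    PySem.List.pyGetD_mem a [] (by simp [PySem.Raise.InRange]; omega)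
  have hrl : mN ≤ (PySem.List.pyGetD a i []).length := hrow _ hmemrow
  have hlen : (((PySem.List.pyGetD a i []).take mN).map String.toList).length = mN := by
    simp [List.length_take]; omega
  have hlen2 : ((PySem.List.pyGetD a i []).take mN).length = mN := by
    simp [List.length_take]; omega
  have hne : ((PySem.List.pyGetD a i []).take mN) ≠ [] := by
    intro h
    rw [h] at hlen2
    simp at hlen2
    omega
  rw [innerA0 _ _ (((PySem.List.pyGetD a i []).take mN).map String.toList) _ _ (by rw [hlen])
    (by
      intro k hk
      rw [hlen] at hk
      simp only [leercruCell]
      have : PySem.List.pyGet? (PySem.List.pyGetD a i []) (k : Int)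
          = some (PySem.List.pyGetD a i [])[k] := by
        rw [PySem.List.pyGet?_natCast]
        exact List.getElem?_eq_getElem (by omega)
      rw [show ((PySem.List.pyGet? a i).getD [] : List String) = PySem.List.pyGetD a i [] from rfl,
        this]
      simp [List.getElem_take])]
  rw [if_neg (by simpa using hne)]
  rw [lineA_line _ _ hne]

-- one column of A's second double loop = B's cut loop on that column
theorem colStep (a : List (List String)) (hne : a ≠ []) (j : Int) (L : List String) :
    (PySem.List.pyRange 0 ((a.length : Int)) 1).foldl
      (fun (st : List Char × List String) i =>
        if leercruCell a i j = ['*'] then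
          if 2 ≤ st.1.length then ([], st.2 ++ [String.ofList st.1]) else ([], st.2)
        else
          if i = (a.length : Int) - 1 then
            if 1 ≤ st.1.length then ([], st.2 ++ [String.ofList (st.1 ++ leercruCell a i j)])
            else ([], st.2)
          else (st.1 ++ leercruCell a i j, st.2)) ([], L)
    = ([], lineWords (a.map (fun r => (PySem.List.pyGet? r j).getD "")) L) := by
  have hlen : ((a.map fun r => ((PySem.List.pyGet? r j).getD "").toList)).length = a.length := by
    simp
  have hcs : (a.map fun r => (PySem.List.pyGet? r j).getD "") ≠ [] := by simpa using hne
  rw [innerA0 _ _ (a.map fun r => ((PySem.List.pyGet? r j).getD "").toList) _ _ (by rw [hlen])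
    (by
      intro k hk
      rw [hlen] at hk
      simp only [leercruCell]
      rw [PySem.List.pyGet?_natCast, List.getElem?_eq_getElem hk]
      simp)]
  rw [if_neg (by simpa using hne)]
  rw [show (a.map fun r => ((PySem.List.pyGet? r j).getD "").toList)
        = (a.map fun r => (PySem.List.pyGet? r j).getD "").map String.toList from by
      simp [List.map_map]]
  rw [lineA_line _ _ hcs]

-- ===== VERDICT (by name: the statement is the Claim_ definition above) =====
theorem leercru_spec : Claim_equal_leercru := by
  intro a _ hpre
  obtain ⟨hne, hrowD⟩ := hpre
  show leercru a = leercru_alt a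
  obtain ⟨r0, t, rfl⟩ := List.exists_cons_of_ne_nil hne
  simp only [List.headD_cons] at hrowD
  simp only [leercru, leercru_alt, PySem.List.len_eq, PySem.List.pyGet?_zero_cons,
    Option.getD_some]
  by_cases h0 : r0.length = 0
  · have hz : ∀ r : List String, PySem.List.slice r none (some (0 : Int)) = [] := by
      intro r
      have h := PySem.List.slice_to_natCast r 0
      simpa using h
    have hlw : ∀ words, lineWords [] words = words := by
      intro words
      rw [lineWords_noStar [] words (by simp)]
      simp [jc]
    have hrep : ∀ (n : Nat) (L : List String),
        List.foldl (fun words cells => lineWords cells words) L (List.replicate n ([] : List String)) = L := by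
      intro n
      induction n with
      | zero => intro L; rfl
      | succ k ihn => intro L; simp [List.replicate_succ, hlw, ihn]
    simp [h0, PySem.List.pyRange_one_eq_nil (le_refl (0 : Int)), List.foldl_fixed, hz, hlw, hrep]
  · have hm0 : 0 < r0.length := Nat.pos_of_ne_zero h0
    -- A's first double loop
    rw [foldPair _ (fun L i => lineWords ((PySem.List.pyGetD (r0 :: t) i []).take r0.length) L)
        (PySem.List.pyRange 0 (((r0 :: t).length : Int)) 1)
        (by
          intro i hi L
          rw [PySem.List.mem_pyRange_one] at hi
          exact rowStep (r0 :: t) r0.length hm0 i hrowD hi.1 hi.2 L) []]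
    -- A's second double loop
    rw [foldPair _ (fun L j => lineWords ((r0 :: t).map (fun r => (PySem.List.pyGet? r j).getD "")) L)
        (PySem.List.pyRange 0 ((r0.length : Int)) 1)
        (fun j _ L => colStep (r0 :: t) hne j L) _]
    -- B: fold over rows ++ cols splits into the two phases
    rw [List.foldl_append]
    -- rows phase: index fold over pyRange = fold over the rows themselves
    rw [PySem.List.foldl_pyRange_zero_pyGetD' (r0 :: t) []
        (fun L row => lineWords (row.take r0.length) L) []]
    rw [List.foldl_map, List.foldl_map]
    rw [show (fun (words : List String) r =>
          lineWords (PySem.List.slice r none (some ((r0.length : Nat) : Int))) words)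
        = fun L row => lineWords (row.take r0.length) L from by
      funext L r
      rw [PySem.List.slice_to_natCast]]
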